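-- pv_equiv track=rewrite | github.com/belikandrey/PythonFirstSteps | second.py | create_matrix
-- ===== SOURCE A (Python) =====
-- def create_matrix(size):
--     arr = []
--     counter = 1
--     for i in range(size):
--         row = []
--         for j in range(size):
--             row.append(counter)
--             counter += 1
--         arr.append(row)
--     return arr
-- ===== SOURCE B (Python) =====
-- def create_matrix(size):
--     if size <= 0:
--         return []
--     flat = list(range(1, size * size + 1))
--     return [flat[r * size:(r + 1) * size] for r in range(size)]
-- ===== Notes on version B (the rewrite author's own statement) =====
-- stated objective: alternative
-- what changed: Instead of nested loops threading a mutable counter through element-by-element appends, B materialises the whole flat sequence 1..size*size in one pass and then partitions it into rows by slicing, with no per-element state at all.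
import Mathlib
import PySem

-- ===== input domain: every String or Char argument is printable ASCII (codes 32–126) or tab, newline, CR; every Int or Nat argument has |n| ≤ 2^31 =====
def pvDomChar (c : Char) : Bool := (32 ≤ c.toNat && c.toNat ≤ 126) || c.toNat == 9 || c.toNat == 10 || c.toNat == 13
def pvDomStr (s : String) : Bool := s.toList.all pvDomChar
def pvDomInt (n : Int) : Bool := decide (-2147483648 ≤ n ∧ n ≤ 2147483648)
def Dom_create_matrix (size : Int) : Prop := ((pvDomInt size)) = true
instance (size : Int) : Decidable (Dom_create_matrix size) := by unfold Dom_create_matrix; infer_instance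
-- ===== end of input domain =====

-- B builds the flat sequence 1..size*size once and partitions it into rows by slicing,
-- replacing A's mutable counter threaded through nested append loops; equal output, same cost.

-- ===== PORT A =====
-- literal port of A: outer loop threads (arr, counter); inner loop threads (row, counter)
def create_matrix (size : Int) : List (List Int) :=
  let st := (PySem.List.pyRange 0 size 1).foldl
    (fun (st : List (List Int) × Int) _ =>
      let rc := (PySem.List.pyRange 0 size 1).foldl
        (fun (rc : List Int × Int) _ => (rc.1 ++ [rc.2], rc.2 + 1))
        ([], st.2)
      (st.1 ++ [rc.1], rc.2))
    ([], 1)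
  st.1

-- ===== PORT B =====
-- literal port of B: empty for size<=0; else flat = list(range(1, size*size+1)) sliced into rows
def create_matrix_alt (size : Int) : List (List Int) :=
  if size ≤ 0 then []
  else
    let flat := PySem.List.pyRange 1 (size * size + 1) 1
    (PySem.List.pyRange 0 size 1).map
      (fun r => PySem.List.slice flat (some (r * size)) (some ((r + 1) * size)))

-- ===== PRECONDITION & SPEC =====
def Spec_create_matrix (size : Int) (out : List (List Int)) : Prop := out = create_matrix_alt size
instance (size : Int) (out : List (List Int)) : Decidable (Spec_create_matrix size out) := by unfold Spec_create_matrix; infer_instance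

-- ===== CLAIM (what is proved, stated in full; the proofs are below) =====
def Claim_equal_create_matrix : Prop := ∀ (size : Int), Dom_create_matrix size → Spec_create_matrix size (create_matrix size)

-- ===== LEMMAS AND PROOFS =====

-- inner loop from counter c over any list of length n builds pyRange c (c+n) 1 and ends at c+n
theorem pv_inner (l : List Int) (c : Int) (acc : List Int) :
    l.foldl (fun (rc : List Int × Int) _ => (rc.1 ++ [rc.2], rc.2 + 1)) (acc, c)
      = (acc ++ PySem.List.pyRange c (c + l.length) 1, c + l.length) := by
  induction l generalizing c acc with
  | nil => simp [PySem.List.pyRange_one_eq_nil]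
  | cons x xs ih =>
    simp only [List.foldl_cons, ih, List.length_cons]
    have hr : PySem.List.pyRange c (c + (↑(xs.length + 1) : Int)) 1
        = c :: PySem.List.pyRange (c + 1) (c + (↑(xs.length + 1) : Int)) 1 :=
      PySem.List.pyRange_one_cons (by push_cast; omega)
    have hb : c + (↑(xs.length + 1) : Int) = c + 1 + (↑xs.length : Int) := by push_cast; omega
    rw [hr, hb, Prod.mk.injEq]
    exact ⟨by simp, rfl⟩

-- outer loop invariant: after consuming pyRange k size 1 starting with counter k*size+1
theorem pv_outer (size : Int) (n' : Nat) (n : Nat) (hn : (↑n : Int) = size) (k : Int) (hk : 0 ≤ k)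
    (hks : k < size) (hm : size - k = (↑n' : Int) + 1) (acc : List (List Int)) :
    (PySem.List.pyRange k size 1).foldl
      (fun (st : List (List Int) × Int) _ =>
        (st.1 ++ [((PySem.List.pyRange 0 size 1).foldl
            (fun (rc : List Int × Int) _ => (rc.1 ++ [rc.2], rc.2 + 1)) ([], st.2)).1],
         ((PySem.List.pyRange 0 size 1).foldl
            (fun (rc : List Int × Int) _ => (rc.1 ++ [rc.2], rc.2 + 1)) ([], st.2)).2))
      (acc, k * size + 1)
      = (acc ++ (PySem.List.pyRange k size 1).map
          (fun i => PySem.List.pyRange (i * size + 1) (i * size + size + 1) 1),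
         size * size + 1) := by
  have hlen : ((PySem.List.pyRange 0 size 1).length : Int) = size := by
    rw [PySem.List.length_pyRange_one]; omega
  induction n' generalizing k acc with
  | zero =>
    rw [PySem.List.pyRange_one_cons hks,
        PySem.List.pyRange_one_eq_nil (by omega : size ≤ k + 1)]
    simp only [List.foldl_cons, List.foldl_nil, List.map_cons, List.map_nil]
    rw [pv_inner]
    dsimp only
    rw [List.nil_append, hlen, Prod.mk.injEq]
    have hk2 : size = k + 1 := by omega
    subst hk2
    constructor
    · have : k * (k + 1) + 1 + (k + 1) = k * (k + 1) + (k + 1) + 1 := by ring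
      rw [this]
    · ring
  | succ m ih =>
    rw [PySem.List.pyRange_one_cons hks]
    simp only [List.foldl_cons, List.map_cons]
    rw [pv_inner]
    dsimp only
    rw [List.nil_append, hlen]
    have hstep : k * size + 1 + size = (k + 1) * size + 1 := by ring
    rw [hstep]
    rw [ih (k + 1) (by omega) (by omega) (by omega)
        (acc ++ [PySem.List.pyRange (k * size + 1) ((k + 1) * size + 1) 1])]
    rw [List.append_assoc]
    have : k * size + size + 1 = (k + 1) * size + 1 := by ring
    rw [this]
    rfl

-- dropping j elements of an int range advances its start by j
theorem pv_drop_pyRange (j : Nat) (a b : Int) :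
    (PySem.List.pyRange a b 1).drop j = PySem.List.pyRange (a + j) b 1 := by
  induction j generalizing a with
  | zero => simp
  | succ m ih =>
    by_cases h : a < b
    · rw [PySem.List.pyRange_one_cons h]
      rw [List.drop_succ_cons, ih (a + 1)]
      congr 1; push_cast; ring
    · rw [PySem.List.pyRange_one_eq_nil (by omega),
          PySem.List.pyRange_one_eq_nil (by push_cast; omega), List.drop_nil]

-- taking n elements of an int range truncates its stop
theorem pv_take_pyRange (n : Nat) (a b : Int) :
    (PySem.List.pyRange a b 1).take n = PySem.List.pyRange a (min b (a + n)) 1 := by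
  induction n generalizing a with
  | zero =>
    rw [List.take_zero, PySem.List.pyRange_one_eq_nil (by omega : min b (a + ((0:Nat):Int)) ≤ a)]
  | succ m ih =>
    by_cases h : a < b
    · rw [PySem.List.pyRange_one_cons h, List.take_succ_cons, ih (a + 1)]
      rw [PySem.List.pyRange_one_cons (by push_cast; omega : a < min b (a + ((m:Nat)+1:Nat)))]
      congr 2; push_cast; omega
    · rw [PySem.List.pyRange_one_eq_nil (by omega),
          PySem.List.pyRange_one_eq_nil (by omega : min b (a + ((m:Nat)+1:Nat)) ≤ a), List.take_nil]

-- slicing the flat sequence at row r yields exactly that row's range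
theorem pv_slice_row (size r : Int) (hr0 : 0 ≤ r) (hrs : r < size) :
    PySem.List.slice (PySem.List.pyRange 1 (size * size + 1) 1)
        (some (r * size)) (some ((r + 1) * size))
      = PySem.List.pyRange (r * size + 1) (r * size + size + 1) 1 := by
  have hs : 0 < size := by omega
  have ha : 0 ≤ r * size := mul_nonneg hr0 (by omega)
  have hb : 0 ≤ (r + 1) * size := mul_nonneg (by omega) (by omega)
  rw [PySem.List.slice_toNat _ ha hb, pv_drop_pyRange, pv_take_pyRange]
  have hab : r * size ≤ (r + 1) * size := by nlinarith
  have hbs : (r + 1) * size ≤ size * size := by nlinarith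
  have h1 : (1 : Int) + ((r * size).toNat : Int) = r * size + 1 := by omega
  have h2 : ((((r + 1) * size).toNat - (r * size).toNat : Nat) : Int)
      = (r + 1) * size - r * size := by omega
  rw [h1]
  have h3 : min (size * size + 1) (r * size + 1 + (((r + 1) * size).toNat - (r * size).toNat : Nat))
      = r * size + size + 1 := by
    rw [h2]; have : r * size + 1 + ((r + 1) * size - r * size) = r * size + size + 1 := by ring
    rw [this]; omega
  rw [h3]

-- ===== VERDICT (by name: the statement is the Claim_ definition above) =====
theorem create_matrix_spec : Claim_equal_create_matrix := by
  intro size _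
  unfold Spec_create_matrix create_matrix create_matrix_alt
  by_cases h : size ≤ 0
  · rw [PySem.List.pyRange_one_eq_nil h, if_pos h]; simp
  · rw [if_neg h]
    have hpos : 0 < size := by omega
    have h0 := pv_outer size (size - 1).toNat size.toNat (by omega) 0 le_rfl hpos (by omega) []
    simp only [zero_mul, zero_add] at h0
    rw [h0]
    dsimp only
    rw [List.nil_append]
    refine List.map_congr_left (fun r hr => ?_)
    have := (PySem.List.mem_pyRange_one).mp hr
    rw [pv_slice_row size r this.1 this.2]
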